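-- pv_equiv track=rewrite | github.com/hydroo/minor-thesis-barriers | models/prism/add-fetch/gen.py | forMe
-- ===== SOURCE A (Python) =====
-- def forMe(p, threadCount) :
-- 	#me and all but one other
-- 	l = []
-- 	for fromWhom in range(0, threadCount) :
-- 		if fromWhom != p :
-- 			s = ""
-- 			for forWhom in range(0, threadCount) :
-- 				if forWhom != fromWhom :
-- 					s += str(forWhom)
-- 			l += [s]
-- 	return l
-- ===== SOURCE B (Python) =====
-- def forMe(p, threadCount):
--     digits = [str(i) for i in range(threadCount)]
--     return ["".join(digits[:i] + digits[i + 1:])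
--             for i in range(threadCount) if i != p]
-- ===== Notes on version B (the rewrite author's own statement) =====
-- stated objective: simpler
-- what changed: Precomputes the per-thread digit strings once and builds each result by one list-splice + join, replacing A's nested loop that re-stringifies every number and re-concatenates character-wise for every retained thread.
import Mathlib
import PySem

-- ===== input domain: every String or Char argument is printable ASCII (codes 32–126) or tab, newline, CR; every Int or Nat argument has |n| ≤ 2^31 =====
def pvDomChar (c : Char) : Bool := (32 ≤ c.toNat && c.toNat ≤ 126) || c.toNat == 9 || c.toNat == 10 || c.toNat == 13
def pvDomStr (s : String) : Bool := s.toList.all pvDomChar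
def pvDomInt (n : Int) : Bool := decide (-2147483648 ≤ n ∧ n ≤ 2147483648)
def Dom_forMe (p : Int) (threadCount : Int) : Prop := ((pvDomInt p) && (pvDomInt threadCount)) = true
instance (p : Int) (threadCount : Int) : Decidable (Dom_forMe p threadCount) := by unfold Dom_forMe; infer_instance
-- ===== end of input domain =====

-- B precomputes the per-thread digit strings once and splices them per retained thread (simpler decomposition; same asymptotic output cost).

-- ===== PORT A =====
def forMe (p : Int) (threadCount : Int) : List String :=
  (PySem.List.pyRange 0 threadCount 1).foldl (fun l fromWhom =>
    if fromWhom ≠ p then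
      l ++ [(PySem.List.pyRange 0 threadCount 1).foldl
        (fun s forWhom => if forWhom ≠ fromWhom then s ++ PySem.Int.toStr forWhom else s) ""]
    else l) []

-- ===== PORT B =====
def forMe_alt (p : Int) (threadCount : Int) : List String :=
  let digits := (PySem.List.pyRange 0 threadCount 1).map PySem.Int.toStr
  ((PySem.List.pyRange 0 threadCount 1).filter (fun i => decide (i ≠ p))).map
    (fun i => PySem.Str.join ""
      (PySem.List.slice digits none (some i) ++ PySem.List.slice digits (some (i + 1)) none))

-- ===== PRECONDITION & SPEC =====
def Spec_forMe (p : Int) (threadCount : Int) (out : List String) : Prop := out = forMe_alt p threadCount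
instance (p : Int) (threadCount : Int) (out : List String) : Decidable (Spec_forMe p threadCount out) := by unfold Spec_forMe; infer_instance

-- ===== CLAIM (what is proved, stated in full; the proofs are below) =====
def Claim_equal_forMe : Prop := ∀ (p : Int) (threadCount : Int), Dom_forMe p threadCount → Spec_forMe p threadCount (forMe p threadCount)

-- ===== LEMMAS AND PROOFS =====

-- A's inner accumulation loop, characterised on the character-list side.
theorem innerA_toList (l : List Int) (i : Int) (s : String) :
    (l.foldl (fun s x => if x ≠ i then s ++ PySem.Int.toStr x else s) s).toList
      = s.toList ++ (l.filter (fun x => decide (x ≠ i))).flatMap PySem.Int.toChars := by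
  induction l generalizing s with
  | nil => simp
  | cons x xs ih =>
    simp only [List.foldl_cons]
    split_ifs with hx
    · rw [ih]
      simp [hx, String.toList_append, PySem.Int.toList_toStr]
    · rw [ih]
      simp at hx
      simp [hx]

theorem intercalate_nil_flatten (css : List (List Char)) :
    List.intercalate ([] : List Char) css = css.flatten := by
  induction css with
  | nil => rfl
  | cons c cs ih => cases cs <;> simp_all [List.intercalate, List.intersperse]

theorem join_empty_toList (parts : List String) :
    (PySem.Str.join "" parts).toList = (parts.map String.toList).flatten := by
  simp [PySem.Chars.join]
  exact intercalate_nil_flatten _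

-- filtering i out of range(0, tc) splits the range around i
theorem filter_ne_pyRange (tc i : Int) (h0 : 0 ≤ i) (h1 : i < tc) :
    (PySem.List.pyRange 0 tc 1).filter (fun x => decide (x ≠ i))
      = PySem.List.pyRange 0 i 1 ++ PySem.List.pyRange (i + 1) tc 1 := by
  rw [PySem.List.pyRange_one_append 0 i tc h0 (le_of_lt h1),
      PySem.List.pyRange_one_append i (i + 1) tc (by omega) (by omega),
      PySem.List.pyRange_one_singleton]
  rw [List.filter_append, List.filter_append]
  have hA : ∀ a ∈ PySem.List.pyRange 0 i 1, decide (a ≠ i) = true := by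
    intro a ha; rw [PySem.List.mem_pyRange_one] at ha; simp; omega
  have hB : ∀ a ∈ PySem.List.pyRange (i + 1) tc 1, decide (a ≠ i) = true := by
    intro a ha; rw [PySem.List.mem_pyRange_one] at ha; simp; omega
  rw [List.filter_eq_self.mpr hA, List.filter_eq_self.mpr hB]
  simp

theorem take_pyRange (tc i : Int) (h0 : 0 ≤ i) (h1 : i ≤ tc) :
    (PySem.List.pyRange 0 tc 1).take i.toNat = PySem.List.pyRange 0 i 1 := by
  rw [PySem.List.pyRange_one_append 0 i tc h0 h1]
  have hl : (PySem.List.pyRange 0 i 1).length = i.toNat := by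
    rw [PySem.List.length_pyRange_one]; omega
  rw [← hl, List.take_left]

theorem drop_pyRange (tc i : Int) (h0 : 0 ≤ i) (h1 : i ≤ tc) :
    (PySem.List.pyRange 0 tc 1).drop i.toNat = PySem.List.pyRange i tc 1 := by
  rw [PySem.List.pyRange_one_append 0 i tc h0 h1]
  have hl : (PySem.List.pyRange 0 i 1).length = i.toNat := by
    rw [PySem.List.length_pyRange_one]; omega
  rw [← hl, List.drop_left]

-- ===== VERDICT (by name: the statement is the Claim_ definition above) =====
theorem forMe_spec : Claim_equal_forMe := by
  intro p tc _
  unfold Spec_forMe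
  simp only [forMe, forMe_alt]
  rw [PySem.List.foldl_append_ite (fun x => x ≠ p)
      (fun fromWhom => (PySem.List.pyRange 0 tc 1).foldl
        (fun s forWhom => if forWhom ≠ fromWhom then s ++ PySem.Int.toStr forWhom else s) "")]
  simp only [List.nil_append]
  apply List.map_congr_left
  intro i hi
  have hmem : i ∈ PySem.List.pyRange 0 tc 1 := (List.mem_filter.mp hi).1
  rw [PySem.List.mem_pyRange_one] at hmem
  apply String.toList_inj.mp
  rw [innerA_toList, join_empty_toList]
  rw [PySem.List.slice_to _ hmem.1, PySem.List.slice_from _ (by omega : (0:Int) ≤ i + 1)]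
  rw [← List.map_take, ← List.map_drop, take_pyRange tc i hmem.1 (le_of_lt hmem.2),
      drop_pyRange tc (i + 1) (by omega) (by omega)]
  rw [filter_ne_pyRange tc i hmem.1 hmem.2]
  simp [List.flatMap_def, Function.comp_def, PySem.Int.toList_toStr]
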